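-- pv_equiv track=rewrite | github.com/MrBrantCode/unitest_baseline | mut_generate/mist_train_taco/taco_1735/solution.py | can_compose_letter
-- ===== SOURCE A (Python) =====
-- def can_compose_letter(s1: str, s2: str) -> str:
--     # Remove spaces from both strings
--     s1 = ''.join(s1.split())
--     s2 = ''.join(s2.split())
--
--     # Create a dictionary to count occurrences of each character in s1
--     s1_count = {}
--     for char in s1:
--         if char in s1_count:
--             s1_count[char] += 1
--         else:
--             s1_count[char] = 1
--
--     # Check if s2 can be composed using characters from s1
--     for char in s2:
--         if char not in s1_count or s1_count[char] == 0:
--             return "NO"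
--         s1_count[char] -= 1
--
--     return "YES"
-- ===== SOURCE B (Python) =====
-- def can_compose_letter(s1: str, s2: str) -> str:
--     # Remove spaces from both strings
--     t1 = list(''.join(s1.split()))
--     t2 = list(''.join(s2.split()))
--     # Multiset-inclusion check: every distinct char of t2 occurs at least
--     # as often in t1 (two counting passes instead of a decrement loop).
--     return "YES" if all(t2.count(c) <= t1.count(c) for c in set(t2)) else "NO"
-- ===== Notes on version B (the rewrite author's own statement) =====
-- stated objective: idiomatic
-- what changed: Replaced A's mutable count-dict built from s1 plus an early-returning per-character decrement loop over s2 with a direct multiset-inclusion check: for each distinct character of the stripped s2, compare its count in s2 with its count in s1.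
import Mathlib
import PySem

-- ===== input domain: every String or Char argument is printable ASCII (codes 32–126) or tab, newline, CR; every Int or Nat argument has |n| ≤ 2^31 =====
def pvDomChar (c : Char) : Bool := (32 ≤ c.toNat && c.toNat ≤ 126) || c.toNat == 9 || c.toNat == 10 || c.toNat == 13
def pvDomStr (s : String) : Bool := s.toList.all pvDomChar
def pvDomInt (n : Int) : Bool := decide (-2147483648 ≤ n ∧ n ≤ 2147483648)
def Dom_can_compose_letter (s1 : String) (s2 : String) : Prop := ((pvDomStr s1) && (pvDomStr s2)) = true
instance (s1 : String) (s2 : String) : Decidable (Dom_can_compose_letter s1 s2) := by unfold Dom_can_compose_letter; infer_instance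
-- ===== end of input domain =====

-- B replaces A's mutable count-dict plus early-returning decrement loop over s2 by a
-- direct multiset-inclusion check (per distinct char of s2, compare the two counts); same cost class, more idiomatic.

-- ===== PORT A =====
-- ''.join(s.split())  (identical line in both Python sources)
def pvStripSpaces (s : String) : String := PySem.Str.join "" (PySem.Str.split₀ s)

-- the s1 counting loop of A
def pvCountA (l : List Char) : PySem.Dict Char Int :=
  l.foldl (fun d c => if d.contains c then d.insert c (d.getD c 0 + 1) else d.insert c 1)
    PySem.Dict.empty

-- the early-returning decrement loop of A over s2
def pvCheckA : List Char → PySem.Dict Char Int → String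
  | [], _ => "YES"
  | c :: rest, d =>
    if !d.contains c || d.getD c 0 == 0 then "NO"
    else pvCheckA rest (d.insert c (d.getD c 0 - 1))

def can_compose_letter (s1 : String) (s2 : String) : String :=
  let s1' := pvStripSpaces s1
  let s2' := pvStripSpaces s2
  pvCheckA s2'.toList (pvCountA s1'.toList)

-- ===== PORT B =====
def can_compose_letter_alt (s1 : String) (s2 : String) : String :=
  let t1 := (pvStripSpaces s1).toList
  let t2 := (pvStripSpaces s2).toList
  if (PySem.Set.ofList t2).all (fun c => PySem.List.count t2 c ≤ PySem.List.count t1 c)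
  then "YES" else "NO"

-- ===== PRECONDITION & SPEC =====
def Spec_can_compose_letter (s1 : String) (s2 : String) (out : String) : Prop := out = can_compose_letter_alt s1 s2
instance (s1 : String) (s2 : String) (out : String) : Decidable (Spec_can_compose_letter s1 s2 out) := by unfold Spec_can_compose_letter; infer_instance

-- ===== CLAIM (what is proved, stated in full; the proofs are below) =====
def Claim_equal_can_compose_letter : Prop := ∀ (s1 : String) (s2 : String), Dom_can_compose_letter s1 s2 → Spec_can_compose_letter s1 s2 (can_compose_letter s1 s2)

-- ===== LEMMAS AND PROOFS =====

-- A's counting loop builds Counter(s1)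
lemma pvCountA_eq_counter (l : List Char) : pvCountA l = PySem.Dict.counter l := by
  unfold pvCountA
  rw [show (fun (d : PySem.Dict Char Int) (c : Char) =>
        if d.contains c then d.insert c (d.getD c 0 + 1) else d.insert c 1)
      = (fun d c => d.insert c (d.getD c 0 + 1)) from ?_ ]
  · exact PySem.Dict.foldl_insert_getD_add_one_eq_counter l
  · funext d c
    by_cases h : d.contains c
    · simp [h]
    · rw [if_neg (by simpa using h), PySem.Dict.getD_of_not_contains d 0 (by simpa using h)]
      norm_num

-- characterisation of A's decrement loop
lemma pvCheckA_eq_yes_iff (l : List Char) (d : PySem.Dict Char Int)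
    (h : ∀ c, 0 ≤ d.getD c 0) :
    pvCheckA l d = "YES" ↔ ∀ c, (l.count c : Int) ≤ d.getD c 0 := by
  induction l generalizing d with
  | nil => simp [pvCheckA]; intro c; exact h c
  | cons c rest ih =>
    by_cases hz : d.getD c 0 = 0
    · have hcond : (!d.contains c || d.getD c 0 == 0) = true := by simp [hz]
      have hfalse : ¬ ∀ x, (((c :: rest).count x : Int)) ≤ d.getD x 0 := by
        intro hall
        have := hall c
        simp [hz] at this
        omega
      simp only [pvCheckA, hcond, if_true]
      simp [hfalse]
    · have hcont : d.contains c = true := by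
        by_contra hc
        exact hz (PySem.Dict.getD_of_not_contains d 0 (by simpa using hc))
      have hcond : (!d.contains c || d.getD c 0 == 0) = false := by
        simp [hcont, hz]
      simp only [pvCheckA, hcond, Bool.false_eq_true, if_false]
      rw [ih _ (by
        intro x
        rw [PySem.Dict.getD_insert]
        split
        · rename_i hx; subst hx; have := h x; omega
        · exact h x)]
      refine forall_congr' (fun x => ?_)
      rw [PySem.Dict.getD_insert]
      by_cases hxc : x = c
      · subst hxc
        simp
      · simp [hxc, Ne.symm hxc]

-- B's set-quantified count comparison, stated over all characters
lemma alt_all_iff (t1 t2 : List Char) :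
    ((PySem.Set.ofList t2).all
        (fun c => PySem.List.count t2 c ≤ PySem.List.count t1 c)) = true
      ↔ ∀ c, (t2.count c : Int) ≤ (t1.count c : Int) := by
  rw [List.all_eq_true]
  constructor
  · intro hall c
    by_cases hc : c ∈ t2
    · have := hall c (by rw [PySem.Set.mem_ofList]; exact hc)
      simpa [PySem.List.count_eq] using this
    · have : t2.count c = 0 := List.count_eq_zero_of_not_mem hc
      simp [this]
  · intro hall c _
    simpa [PySem.List.count_eq] using hall c

lemma pvCheckA_yes_or_no (l : List Char) (d : PySem.Dict Char Int) :
    pvCheckA l d = "YES" ∨ pvCheckA l d = "NO" := by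
  induction l generalizing d with
  | nil => left; rfl
  | cons c rest ih =>
    simp only [pvCheckA]
    split
    · right; rfl
    · exact ih _

-- ===== VERDICT (by name: the statement is the Claim_ definition above) =====
lemma key_lemma (t1 t2 : List Char) :
    pvCheckA t2 (pvCountA t1)
      = (if (PySem.Set.ofList t2).all
            (fun c => PySem.List.count t2 c ≤ PySem.List.count t1 c)
         then "YES" else "NO") := by
  rw [pvCountA_eq_counter]
  have hpos : ∀ c, 0 ≤ (PySem.Dict.counter t1).getD c 0 := by
    intro c; rw [PySem.Dict.getD_counter]; exact Int.natCast_nonneg _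
  have hA := pvCheckA_eq_yes_iff t2 (PySem.Dict.counter t1) hpos
  have hcnt : ∀ c, (PySem.Dict.counter t1).getD c 0 = (t1.count c : Int) :=
    fun c => PySem.Dict.getD_counter t1 c
  by_cases hall : ∀ c, (t2.count c : Int) ≤ (t1.count c : Int)
  · rw [if_pos ((alt_all_iff t1 t2).mpr hall)]
    exact hA.mpr (fun c => (hcnt c) ▸ hall c)
  · rw [if_neg (fun hb => hall ((alt_all_iff t1 t2).mp hb))]
    rcases pvCheckA_yes_or_no t2 (PySem.Dict.counter t1) with hy | hn
    · exact absurd (fun c => (hcnt c) ▸ hA.mp hy c) hall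
    · exact hn

-- ===== VERDICT (by name: the statement is the Claim_ definition above) =====
theorem can_compose_letter_spec : Claim_equal_can_compose_letter := by
  intro s1 s2 _
  unfold Spec_can_compose_letter can_compose_letter can_compose_letter_alt
  exact key_lemma (pvStripSpaces s1).toList (pvStripSpaces s2).toList
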